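-- pv_equiv track=rewrite | github.com/leolilley/kiwi-mcp | kiwi_mcp/safety_harness/capabilities.py | expand_capabilities
-- ===== SOURCE A (Python) =====
-- from typing import Any, Dict, List, Optional, Set
--
-- CAPABILITY_HIERARCHY: Dict[str, List[str]] = {
--     # kiwi-mcp.all grants all kiwi-mcp capabilities
--     "kiwi-mcp.all": [
--         "kiwi-mcp.execute",
--         "kiwi-mcp.search",
--         "kiwi-mcp.load",
--         "kiwi-mcp.sign",
--         "kiwi-mcp.help",
--     ],
--     # kiwi-mcp.execute implies search/load/help (need to find things to execute)
--     "kiwi-mcp.execute": [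
--         "kiwi-mcp.search",
--         "kiwi-mcp.load",
--         "kiwi-mcp.help",
--     ],
--     # fs.write implies fs.read
--     "fs.write": ["fs.read"],
-- }
--
-- def expand_capabilities(caps: List[str]) -> Set[str]:
--     """Expand capabilities using the hierarchy.
--
--     If a token has 'kiwi-mcp.execute', it implicitly has
--     'kiwi-mcp.search', 'kiwi-mcp.load', 'kiwi-mcp.help'.
--
--     Args:
--         caps: List of capability strings
--
--     Returns:
--         Set of all capabilities (original + implied)
--     """
--     expanded: Set[str] = set(caps)
--
--     # Keep expanding until no new caps are added
--     changed = True
--     while changed: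
--         changed = False
--         for cap in list(expanded):
--             if cap in CAPABILITY_HIERARCHY:
--                 implied = set(CAPABILITY_HIERARCHY[cap])
--                 new_caps = implied - expanded
--                 if new_caps:
--                     expanded.update(new_caps)
--                     changed = True
--
--     return expanded
-- ===== SOURCE B (Python) =====
-- from typing import Dict, List, Set
--
-- CAPABILITY_HIERARCHY: Dict[str, List[str]] = {
--     "kiwi-mcp.all": [
--         "kiwi-mcp.execute",
--         "kiwi-mcp.search",
--         "kiwi-mcp.load",
--         "kiwi-mcp.sign",
--         "kiwi-mcp.help",
--     ],
--     "kiwi-mcp.execute": [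
--         "kiwi-mcp.search",
--         "kiwi-mcp.load",
--         "kiwi-mcp.help",
--     ],
--     "fs.write": ["fs.read"],
-- }
--
-- def expand_capabilities(caps: List[str]) -> Set[str]:
--     """Expand capabilities using the hierarchy.
--
--     CAPABILITY_HIERARCHY is already transitively closed (every capability
--     implied at depth > 1 is also listed directly), so a single pass over the
--     original capabilities adds every implied capability: no stabilization
--     loop, no change flag, no re-scanning of the growing set.
--
--     """
--     expanded: Set[str] = set(caps)
--     for cap in caps:
--         if cap in CAPABILITY_HIERARCHY:
--             expanded.update(CAPABILITY_HIERARCHY[cap])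
--     return expanded
-- ===== Notes on version B (the rewrite author's own statement) =====
-- stated objective: simpler
-- what changed: Replaces A's fixpoint while-loop (repeatedly re-scanning the whole growing set with a changed flag and per-cap set differences until a pass adds nothing) by a single for-loop over the input list: CAPABILITY_HIERARCHY is already transitively closed, so one pass adds every implied capability.
import Mathlib
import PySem

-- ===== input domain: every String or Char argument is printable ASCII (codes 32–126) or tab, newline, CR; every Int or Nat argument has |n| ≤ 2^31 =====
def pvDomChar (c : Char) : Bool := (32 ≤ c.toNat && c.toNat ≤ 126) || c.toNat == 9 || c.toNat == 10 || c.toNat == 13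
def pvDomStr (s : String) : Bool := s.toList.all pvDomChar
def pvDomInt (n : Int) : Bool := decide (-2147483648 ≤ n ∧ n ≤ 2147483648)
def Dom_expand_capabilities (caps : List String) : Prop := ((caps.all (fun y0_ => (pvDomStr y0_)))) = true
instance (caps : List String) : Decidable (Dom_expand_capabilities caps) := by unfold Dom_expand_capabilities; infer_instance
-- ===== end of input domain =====

-- B replaces A's fixpoint while-loop (re-scan the whole set until a pass adds nothing) by a
-- single pass over the input list: the hierarchy table is already transitively closed, so one
-- pass adds every implied capability. Python returns a set; equality here is on the insertion-
-- ordered element lists of the two ports.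

-- ===== PORT A =====
-- CAPABILITY_HIERARCHY (module-level dict constant)
def hierarchy : PySem.Dict String (List String) :=
  PySem.Dict.ofList
    [("kiwi-mcp.all", ["kiwi-mcp.execute", "kiwi-mcp.search", "kiwi-mcp.load", "kiwi-mcp.sign", "kiwi-mcp.help"]),
     ("kiwi-mcp.execute", ["kiwi-mcp.search", "kiwi-mcp.load", "kiwi-mcp.help"]),
     ("fs.write", ["fs.read"])]

-- body of A's inner 'for cap in list(expanded)' loop; state = (expanded, changed)
def aStep (st : List String × Bool) (cap : String) : List String × Bool :=
  match hierarchy.get? cap with          -- 'if cap in CAPABILITY_HIERARCHY' + lookup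
  | none => st
  | some lst =>
      let newCaps := PySem.Set.diff (PySem.Set.ofList lst) st.1   -- implied - expanded
      if newCaps.isEmpty then st
      else (PySem.Set.update st.1 newCaps, true)                  -- expanded.update(new_caps); changed = True

-- one iteration of the while body: snapshot 'list(expanded)', then the for loop
def aPass (e : List String) : List String × Bool := e.foldl aStep (e, false)

-- 'while changed:' — fuel-guarded (totality only); the proofs below show the loop
-- stabilizes after the second pass, so the fuel is never exhausted
def aLoop : Nat → List String → List String
  | 0, e => e
  | f + 1, e =>
      let p := aPass e
      if p.2 then aLoop f p.1 else p.1

def expand_capabilities (caps : List String) : List String :=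
  aLoop (caps.length + 2) (PySem.Set.ofList caps)

-- ===== PORT B =====
-- body of B's single 'for cap in caps' loop: membership test + expanded.update(CAPABILITY_HIERARCHY[cap])
def bStep (e : List String) (cap : String) : List String :=
  match hierarchy.get? cap with
  | none => e
  | some lst => PySem.Set.update e lst

def expand_capabilities_alt (caps : List String) : List String :=
  caps.foldl bStep (PySem.Set.ofList caps)

-- ===== PRECONDITION & SPEC =====
def Spec_expand_capabilities (caps : List String) (out : List String) : Prop := out = expand_capabilities_alt caps
instance (caps : List String) (out : List String) : Decidable (Spec_expand_capabilities caps out) := by unfold Spec_expand_capabilities; infer_instance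

-- ===== CLAIM (what is proved, stated in full; the proofs are below) =====
def Claim_equal_expand_capabilities : Prop := ∀ (caps : List String), Dom_expand_capabilities caps → Spec_expand_capabilities caps (expand_capabilities caps)

-- ===== LEMMAS AND PROOFS =====

theorem hier_eq : hierarchy = PySem.Dict.mk
    [("kiwi-mcp.all", ["kiwi-mcp.execute", "kiwi-mcp.search", "kiwi-mcp.load", "kiwi-mcp.sign", "kiwi-mcp.help"]),
     ("kiwi-mcp.execute", ["kiwi-mcp.search", "kiwi-mcp.load", "kiwi-mcp.help"]),
     ("fs.write", ["fs.read"])] := by decide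

-- the only keys, with their value lists
theorem hget_cases (cap : String) (lst : List String) (h : hierarchy.get? cap = some lst) :
    (cap = "kiwi-mcp.all" ∧ lst = ["kiwi-mcp.execute", "kiwi-mcp.search", "kiwi-mcp.load", "kiwi-mcp.sign", "kiwi-mcp.help"]) ∨
    (cap = "kiwi-mcp.execute" ∧ lst = ["kiwi-mcp.search", "kiwi-mcp.load", "kiwi-mcp.help"]) ∨
    (cap = "fs.write" ∧ lst = ["fs.read"]) := by
  rw [hier_eq] at h
  by_cases h1 : cap = "kiwi-mcp.all"
  · subst h1
    rw [show (PySem.Dict.mk _).get? "kiwi-mcp.all" =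
          some ["kiwi-mcp.execute", "kiwi-mcp.search", "kiwi-mcp.load", "kiwi-mcp.sign", "kiwi-mcp.help"] from by decide] at h
    exact Or.inl ⟨rfl, (Option.some.inj h).symm⟩
  · by_cases h2 : cap = "kiwi-mcp.execute"
    · subst h2
      rw [show (PySem.Dict.mk _).get? "kiwi-mcp.execute" =
            some ["kiwi-mcp.search", "kiwi-mcp.load", "kiwi-mcp.help"] from by decide] at h
      exact Or.inr (Or.inl ⟨rfl, (Option.some.inj h).symm⟩)
    · by_cases h3 : cap = "fs.write"
      · subst h3
        rw [show (PySem.Dict.mk _).get? "fs.write" = some ["fs.read"] from by decide] at h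
        exact Or.inr (Or.inr ⟨rfl, (Option.some.inj h).symm⟩)
      · exfalso
        rw [PySem.Dict.get?_mk_cons, if_neg (by simpa using (Ne.symm h1)),
            PySem.Dict.get?_mk_cons, if_neg (by simpa using (Ne.symm h2)),
            PySem.Dict.get?_mk_cons, if_neg (by simpa using (Ne.symm h3))] at h
        simp [PySem.Dict.get?] at h

-- set difference is the membership filter (definitional)
theorem diff_eq_filter (s t : List String) :
    PySem.Set.diff s t = s.filter (fun y => !(PySem.Set.contains t y)) := rfl

-- the two loop bodies build the same expanded set
theorem step_fst (st : List String × Bool) (cap : String) : (aStep st cap).1 = bStep st.1 cap := by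
  unfold aStep bStep
  cases hg : hierarchy.get? cap with
  | none => rfl
  | some lst =>
      simp only
      by_cases he : (PySem.Set.diff (PySem.Set.ofList lst) st.1).isEmpty
      · rw [if_pos he]
        rw [PySem.Set.update_eq_append_filter, ← diff_eq_filter,
            List.isEmpty_iff.mp he, List.append_nil]
      · rw [if_neg he]
        rw [PySem.Set.update_eq_append_of_disjoint, PySem.Set.update_eq_append_filter, ← diff_eq_filter]
        · exact (List.Nodup.filter _ (PySem.Set.nodup_ofList lst))
        · intro x hx
          rw [diff_eq_filter] at hx
          have := (List.mem_filter.mp hx).2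
          simp only [Bool.not_eq_eq_eq_not, Bool.not_true] at this
          intro hmem
          rw [(PySem.Set.contains_iff st.1 x).mpr hmem] at this
          exact Bool.true_eq_false.mp this

theorem foldl_fst (l : List String) : ∀ (p : List String × Bool),
    (l.foldl aStep p).1 = l.foldl bStep p.1 := by
  induction l with
  | nil => intro p; rfl
  | cons a l ih =>
      intro p
      simp only [List.foldl_cons]
      rw [ih (aStep p a), step_fst]

theorem bStep_mono (st : List String) (cap x : String) (hx : x ∈ st) : x ∈ bStep st cap := by
  unfold bStep
  cases hierarchy.get? cap with
  | none => exact hx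
  | some lst => exact (PySem.Set.mem_update st lst x).mpr (Or.inl hx)

theorem bfold_mono (l : List String) : ∀ (st : List String) (x : String), x ∈ st → x ∈ l.foldl bStep st := by
  induction l with
  | nil => intro st x hx; exact hx
  | cons a l ih => intro st x hx; exact ih _ x (bStep_mono st a x hx)

-- once cap ∈ l is processed, its implied caps are in the fold's result
theorem bfold_proc (l : List String) : ∀ (st : List String) (cap : String) (lst : List String),
    cap ∈ l → hierarchy.get? cap = some lst → ∀ x ∈ lst, x ∈ l.foldl bStep st := by
  induction l with
  | nil => intro _ _ _ h; cases h
  | cons a l ih =>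
      intro st cap lst hmem hg x hx
      rcases List.mem_cons.mp hmem with rfl | hmem'
      · apply bfold_mono l (bStep st cap) x
        unfold bStep
        rw [hg]
        exact (PySem.Set.mem_update st lst x).mpr (Or.inr hx)
      · exact ih (bStep st a) cap lst hmem' hg x hx

-- every element of the fold's result came from the start state or from a value list of a processed key
theorem bfold_prov (l : List String) : ∀ (st : List String) (x : String),
    x ∈ l.foldl bStep st →
    x ∈ st ∨ ∃ cap ∈ l, ∃ lst, hierarchy.get? cap = some lst ∧ x ∈ lst := by
  induction l with
  | nil => intro st x hx; exact Or.inl hx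
  | cons a l ih =>
      intro st x hx
      rcases ih (bStep st a) x hx with h | ⟨cap, hc, lst, hg, hxl⟩
      · unfold bStep at h
        cases hg : hierarchy.get? a with
        | none => rw [hg] at h; exact Or.inl h
        | some lst =>
            rw [hg] at h
            rcases (PySem.Set.mem_update st lst x).mp h with h' | h'
            · exact Or.inl h'
            · exact Or.inr ⟨a, List.mem_cons_self, lst, hg, h'⟩
      · exact Or.inr ⟨cap, List.mem_cons_of_mem a hc, lst, hg, hxl⟩

-- the result of B is closed under the hierarchy (because the table is transitively closed)
theorem closed (caps : List String) (cap : String) (lst : List String)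
    (hmem : cap ∈ caps.foldl bStep (PySem.Set.ofList caps))
    (hg : hierarchy.get? cap = some lst) :
    ∀ x ∈ lst, x ∈ caps.foldl bStep (PySem.Set.ofList caps) := by
  intro x hx
  rcases bfold_prov caps _ cap hmem with h | ⟨c', hc', lst', hg', hcl⟩
  · exact bfold_proc caps _ cap lst ((PySem.Set.mem_ofList caps cap).mp h) hg x hx
  · -- cap was itself added as an implied capability of c' ∈ caps
    rcases hget_cases c' lst' hg' with ⟨rfl, rfl⟩ | ⟨rfl, rfl⟩ | ⟨rfl, rfl⟩
    · -- c' = kiwi-mcp.all; the only key among its values is kiwi-mcp.execute,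
      -- and execute's implied caps are also values of kiwi-mcp.all
      have hLA : ∀ y ∈ ["kiwi-mcp.execute", "kiwi-mcp.search", "kiwi-mcp.load", "kiwi-mcp.sign", "kiwi-mcp.help"],
          y ∈ caps.foldl bStep (PySem.Set.ofList caps) :=
        bfold_proc caps _ "kiwi-mcp.all" _ hc' (by rw [hier_eq]; decide)
      rcases hget_cases cap lst hg with ⟨rfl, rfl⟩ | ⟨rfl, rfl⟩ | ⟨rfl, rfl⟩
      · exact absurd hcl (by decide)
      · have hx' := hx
        simp only [List.mem_cons, List.not_mem_nil, or_false] at hx'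
        rcases hx' with rfl | rfl | rfl <;> exact hLA _ (by decide)
      · exact absurd hcl (by decide)
    · rcases hget_cases cap lst hg with ⟨rfl, _⟩ | ⟨rfl, _⟩ | ⟨rfl, _⟩ <;> exact absurd hcl (by decide)
    · rcases hget_cases cap lst hg with ⟨rfl, _⟩ | ⟨rfl, _⟩ | ⟨rfl, _⟩ <;> exact absurd hcl (by decide)

-- a pass of A over a hierarchy-closed state changes nothing and leaves the flag alone
theorem foldl_noop (l : List String) (E : List String)
    (hcl : ∀ cap ∈ l, ∀ lst, hierarchy.get? cap = some lst → ∀ x ∈ lst, x ∈ E) :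
    ∀ c, l.foldl aStep (E, c) = (E, c) := by
  induction l with
  | nil => intro c; rfl
  | cons a l ih =>
      intro c
      have hstep : aStep (E, c) a = (E, c) := by
        unfold aStep
        cases hg : hierarchy.get? a with
        | none => rfl
        | some lst =>
            simp only
            rw [if_pos]
            rw [List.isEmpty_iff, diff_eq_filter, List.filter_eq_nil_iff]
            intro x hxl
            have hxE : x ∈ E := hcl a List.mem_cons_self lst hg x ((PySem.Set.mem_ofList lst x).mp hxl)
            simp [hxE]
      rw [List.foldl_cons, hstep]
      exact ih (fun cap hc => hcl cap (List.mem_cons_of_mem a hc)) c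

-- folding B's body over the input list equals folding it over its dedup (duplicates are no-ops)
theorem bStep_skip (st : List String) (cap : String)
    (h : ∀ lst, hierarchy.get? cap = some lst → ∀ x ∈ lst, x ∈ st) : bStep st cap = st := by
  unfold bStep
  cases hg : hierarchy.get? cap with
  | none => rfl
  | some lst =>
      show PySem.Set.update st lst = st
      rw [PySem.Set.update_eq_append_filter]
      have hnil : (PySem.Set.ofList lst).filter (fun y => !(PySem.Set.contains st y)) = [] :=
        List.filter_eq_nil_iff.mpr (by
          intro x hx
          have hxE := h lst hg x ((PySem.Set.mem_ofList lst x).mp hx)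
          simp [hxE])
      rw [hnil, List.append_nil]

theorem bfold_dedup (l : List String) : ∀ (st : List String),
    l.foldl bStep st = (PySem.Set.ofList l).foldl bStep st := by
  induction l using List.reverseRecOn with
  | nil => intro st; rfl
  | append_singleton l a ih =>
      intro st
      rw [List.foldl_append, PySem.Set.ofList_append_singleton, PySem.Set.add_eq_ite]
      by_cases hm : a ∈ PySem.Set.ofList l
      · rw [if_pos hm, ← ih st]
        have ha : a ∈ l := (PySem.Set.mem_ofList l a).mp hm
        simp only [List.foldl_cons, List.foldl_nil]
        exact bStep_skip _ a (fun lst hg x hx => bfold_proc l st a lst ha hg x hx)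
      · rw [if_neg hm, List.foldl_append, ← ih st]

-- the second pass of A never changes anything, so A = B
theorem expand_eq (caps : List String) : expand_capabilities caps = expand_capabilities_alt caps := by
  unfold expand_capabilities expand_capabilities_alt
  have hE : (aPass (PySem.Set.ofList caps)).1 = caps.foldl bStep (PySem.Set.ofList caps) := by
    unfold aPass
    rw [foldl_fst, ← bfold_dedup]
  have hstable : aPass (caps.foldl bStep (PySem.Set.ofList caps)) =
      (caps.foldl bStep (PySem.Set.ofList caps), false) := by
    unfold aPass
    exact foldl_noop _ _ (fun cap hc lst hg => closed caps cap lst hc hg) false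
  show aLoop (caps.length + 1 + 1) (PySem.Set.ofList caps) = _
  rw [aLoop]
  by_cases hch : (aPass (PySem.Set.ofList caps)).2
  · simp only [hch, if_true]
    rw [hE, aLoop, hstable]
    simp
  · simp only [hch, Bool.false_eq_true, if_false]
    exact hE

-- ===== VERDICT (by name: the statement is the Claim_ definition above) =====
theorem expand_capabilities_spec : Claim_equal_expand_capabilities := by
  intro caps _
  unfold Spec_expand_capabilities
  exact expand_eq caps
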